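-- pv_equiv track=rewrite | github.com/giellatekno/neahttadigisanit | src/neahtta/morphology/morphology.py | check_if_lexicalized
-- ===== SOURCE A (Python) =====
-- def check_if_lexicalized(form, array):
--     for index in range(0, len(array)):
--         if form == array[index].split("+")[0]:
--             array.insert(0, array[index])
--             del array[index + 1]
--             return array
--     else:
--         # If the user input is not in the base form, the for above doesn't find the analyses
--         # so find the longest analyses and put it/them in the first/s element/s
--         # in analyses if it is not one of the single parts
--         mystr = [
--             len(array[index][0:array[index].find("+")])
--             for index in range(0, len(array))
--         ]
--         indmax = [index for index, j in enumerate(mystr) if j == max(mystr)]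
--         if (max(mystr) <= len(form)):
--             index2 = 0
--             for index in range(0, len(indmax)):
--                 array.insert(index2, array.pop(indmax[index]))
--                 index2 += 1
--         return array
-- ===== SOURCE B (Python) =====
-- def check_if_lexicalized(form, array):
--     # Phase 1: first analysis whose base form (before '+') equals the input moves to the front.
--     index = next((i for i, a in enumerate(array) if a.split("+")[0] == form), None)
--     if index is not None:
--         array.insert(0, array.pop(index))
--         return array
--     # Phase 2: stable partition — all analyses with the longest pre-'+' prefix first,
--     # provided that longest prefix is no longer than the input form.
--     lengths = [len(a[0:a.find("+")]) for a in array]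
--     m = max(lengths)  # empty array -> ValueError, as in the original
--     if m <= len(form):
--         array[:] = [a for a, l in zip(array, lengths) if l == m] + \
--                    [a for a, l in zip(array, lengths) if l != m]
--     return array
-- ===== Notes on version B (the rewrite author's own statement) =====
-- stated objective: simpler
-- what changed: Replaces A's index loop with insert/delete-at-stale-index and its indmax/pop/insert move loop (which re-evaluates max(mystr) for every element and moves elements with O(n) pops/inserts) by a first-match search with one pop-and-insert plus a single max and a stable zip/filter partition.
import Mathlib
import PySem

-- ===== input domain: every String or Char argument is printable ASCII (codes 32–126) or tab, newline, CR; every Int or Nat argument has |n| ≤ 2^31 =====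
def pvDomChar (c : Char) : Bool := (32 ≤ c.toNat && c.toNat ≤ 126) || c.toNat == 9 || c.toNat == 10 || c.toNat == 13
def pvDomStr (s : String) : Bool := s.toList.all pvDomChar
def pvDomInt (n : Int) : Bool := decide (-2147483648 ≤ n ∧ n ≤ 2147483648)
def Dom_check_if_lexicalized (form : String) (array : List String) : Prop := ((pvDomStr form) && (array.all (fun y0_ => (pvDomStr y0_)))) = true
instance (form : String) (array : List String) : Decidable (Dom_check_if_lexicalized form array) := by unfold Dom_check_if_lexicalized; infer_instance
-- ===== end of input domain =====

-- B replaces A's two index-juggling loops by a findIdx?-style first-match move and a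
-- stable zip/filter partition (objective: simpler). Return value only: the Python A
-- mutates `array` in place and B performs the same mutation.

-- ===== PORT A =====
-- 'for index in range(0, len(array)): …' with early return; `none` = the loop exhausted
-- (Python's for-else branch runs).
def pvLoopA (form : String) (array : List String) (index : Nat) : Option (List String) :=
  if h : index < array.length then
    -- a.split("+") with a non-empty separator is never empty, so [0] never raises
    if form == PySem.List.pyGetD ((PySem.Str.split? (PySem.List.pyGetD array (index : Int) "") "+").getD []) 0 "" then
      -- array.insert(0, array[index]); del array[index + 1]
      some (List.eraseIdx (PySem.List.insert array 0 (PySem.List.pyGetD array (index : Int) "")) (index + 1))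
    else pvLoopA form array (index + 1)
  else none
termination_by array.length - index

-- the stale-index move loop: 'array.insert(index2, array.pop(indmax[index])); index2 += 1'
def pvMoveA (array : List String) (index2 : Nat) (idxs : List Int) : List String :=
  match idxs with
  | [] => array
  | i :: rest =>
    match PySem.List.pop? array i with
    | some (x, arr) => pvMoveA (PySem.List.insert arr (index2 : Int) x) (index2 + 1) rest
    | none => array   -- list.pop IndexError; never reached (all indices are in range)

def check_if_lexicalized (form : String) (array : List String) : List String :=
  match pvLoopA form array 0 with
  | some r => r
  | none =>
    let mystr : List Int :=
      (PySem.List.pyRange 0 (array.length : Int) 1).map (fun index =>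
        PySem.Str.len (PySem.Str.slice (PySem.List.pyGetD array index "") (some 0)
          (some (PySem.Str.find (PySem.List.pyGetD array index "") "+"))))
    match PySem.List.max? mystr (fun x => x) with
    | none => array   -- max([]) raises ValueError; excluded by Pre_
    | some m =>
      let indmax : List Int := ((PySem.List.enumerate mystr 0).filter (fun p => p.2 == m)).map (·.1)
      if m ≤ PySem.Str.len form then pvMoveA array 0 indmax else array

-- ===== PORT B =====
def check_if_lexicalized_alt (form : String) (array : List String) : List String :=
  match array.findIdx? (fun a => PySem.List.pyGetD ((PySem.Str.split? a "+").getD []) 0 "" == form) with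
  | some i =>
    -- array.insert(0, array.pop(index))
    match PySem.List.pop? array (i : Int) with
    | some (x, rest) => PySem.List.insert rest 0 x
    | none => array   -- never reached: a found index is in range
  | none =>
    let lengths : List Int :=
      array.map (fun a => PySem.Str.len (PySem.Str.slice a (some 0) (some (PySem.Str.find a "+"))))
    match PySem.List.max? lengths (fun x => x) with
    | none => array   -- empty array: max() raises in Python; excluded by Pre_
    | some m =>
      if m ≤ PySem.Str.len form then
        ((array.zip lengths).filter (fun p => p.2 == m)).map (·.1)
          ++ ((array.zip lengths).filter (fun p => p.2 != m)).map (·.1)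
      else array

-- ===== PRECONDITION & SPEC =====
-- On an empty list the Python A reaches max([]) and raises ValueError (B likewise).
def Pre_check_if_lexicalized (_form : String) (array : List String) : Prop := array ≠ []
instance (form : String) (array : List String) : Decidable (Pre_check_if_lexicalized form array) := by unfold Pre_check_if_lexicalized; infer_instance
def pvWitness_check_if_lexicalized : String × List String := ("x", ["x+V"])

def Spec_check_if_lexicalized (form : String) (array : List String) (out : List String) : Prop := out = check_if_lexicalized_alt form array
instance (form : String) (array : List String) (out : List String) : Decidable (Spec_check_if_lexicalized form array out) := by unfold Spec_check_if_lexicalized; infer_instance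

-- ===== CLAIM (what is proved, stated in full; the proofs are below) =====
def Claim_equal_check_if_lexicalized : Prop := ∀ (form : String) (array : List String), Dom_check_if_lexicalized form array → Pre_check_if_lexicalized form array → Spec_check_if_lexicalized form array (check_if_lexicalized form array)

-- ===== LEMMAS AND PROOFS =====

-- the base-form test of phase 1 (B's orientation) and the prefix length of phase 2
def pvBase (form : String) (a : String) : Bool :=
  PySem.List.pyGetD ((PySem.Str.split? a "+").getD []) 0 "" == form

def pvPrefLen (a : String) : Int :=
  PySem.Str.len (PySem.Str.slice a (some 0) (some (PySem.Str.find a "+")))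

-- positions (as Python ints) of the elements of T satisfying p, counted from s
def pvIdxsOf (p : String → Bool) (T : List String) (s : Int) : List Int :=
  match T with
  | [] => []
  | a :: T' => if p a then s :: pvIdxsOf p T' (s + 1) else pvIdxsOf p T' (s + 1)

-- A's index loop is first-match-to-front
lemma pvLoopA_eq (form : String) (array : List String) (index : Nat) :
    pvLoopA form array index =
      (List.findIdx? (pvBase form) (array.drop index)).map
        (fun j => array.getD (index + j) "" :: array.eraseIdx (index + j)) := by
  fun_induction pvLoopA form array index with
  | case1 index h cond =>
    rw [← List.getElem_cons_drop h, List.findIdx?_cons]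
    have hb : pvBase form array[index] = true := by
      rw [PySem.List.pyGetD_natCast, List.getD_eq_getElem array "" h] at cond
      simp only [pvBase]
      rw [Bool.beq_comm]
      exact cond
    simp only [hb, if_true, PySem.List.insert_zero, List.eraseIdx_cons_succ,
      PySem.List.pyGetD_natCast, Nat.add_zero, Option.map_some]
  | case2 index h cond ih =>
    rw [ih, ← List.getElem_cons_drop h, List.findIdx?_cons]
    have hb : pvBase form array[index] = false := by
      rw [PySem.List.pyGetD_natCast, List.getD_eq_getElem array "" h] at cond
      simp only [pvBase]
      rw [Bool.beq_comm]
      simpa using cond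
    simp only [hb, Bool.false_eq_true, if_false, Option.map_map]
    cases hk : List.findIdx? (pvBase form) (array.drop (index + 1)) with
    | none => simp
    | some k =>
      simp only [Option.map_some, Function.comp]
      rw [show index + (k + 1) = index + 1 + k from by omega]
  | case3 index h =>
    rw [List.drop_eq_nil_of_le (by omega), List.findIdx?_nil, Option.map_none]

-- pop at the length of the left part takes out the middle element
lemma pvPop_at (X : List String) (a : String) (Y : List String) :
    PySem.List.pop? (X ++ a :: Y) ((X.length : Nat) : Int) = some (a, X ++ Y) := by
  have h : X.length < (X ++ a :: Y).length := by simp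
  rw [PySem.List.pop?_natCast _ _ h]
  rw [List.getElem_append_right (Nat.le_refl _), List.eraseIdx_append_of_length_le (Nat.le_refl _)]
  simp

-- insert at the length of the left part puts the element in the middle
lemma pvInsert_at (X : List String) (a : String) (Y : List String) :
    PySem.List.insert (X ++ Y) ((X.length : Nat) : Int) a = X ++ a :: Y := by
  rw [PySem.List.insert_natCast _ _ _ (by simp), List.take_left, List.drop_left]

-- A's indmax list is pvIdxsOf
lemma pvIndmax_eq (g : String → Int) (m : Int) (T : List String) (s : Int) :
    ((PySem.List.enumerate (T.map g) s).filter (fun p => p.2 == m)).map (·.1) =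
      pvIdxsOf (fun a => g a == m) T s := by
  induction T generalizing s with
  | nil => simp [pvIdxsOf, PySem.List.enumerate_nil]
  | cons a T ih =>
    simp only [List.map_cons, PySem.List.enumerate_cons, List.filter_cons, pvIdxsOf]
    by_cases h : g a == m
    · simp [h, ih]
    · simp [h, ih]

-- B's zip/filter comprehension filters by the length of the element
lemma pvZipFilter_eq (g : String → Int) (cmp : Int → Bool) (T : List String) :
    ((T.zip (T.map g)).filter (fun p => cmp p.2)).map (·.1) =
      T.filter (fun a => cmp (g a)) := by
  induction T with
  | nil => simp
  | cons a T ih =>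
    simp only [List.map_cons, List.zip_cons_cons, List.filter_cons]
    by_cases h : cmp (g a)
    · simp [h, ih]
    · simp [h, ih]

-- A's stale-index move loop performs a stable partition
lemma pvMoveA_part (p : String → Bool) (T : List String) : ∀ (F S : List String),
    pvMoveA (F ++ (S ++ T)) F.length (pvIdxsOf p T ((F.length : Int) + (S.length : Int))) =
      (F ++ T.filter p) ++ (S ++ T.filter (fun a => !p a)) := by
  induction T with
  | nil => intro F S; simp [pvMoveA, pvIdxsOf]
  | cons a T ih =>
    intro F S
    by_cases h : p a
    · simp only [pvIdxsOf, h, if_true, pvMoveA]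
      rw [show F ++ (S ++ a :: T) = (F ++ S) ++ a :: T by simp,
          show ((F.length : Int) + (S.length : Int)) = (((F ++ S).length : Nat) : Int) by simp,
          pvPop_at]
      dsimp only
      rw [show (F ++ S) ++ T = F ++ (S ++ T) by simp, pvInsert_at,
          show F ++ a :: (S ++ T) = (F ++ [a]) ++ (S ++ T) by simp,
          show F.length + 1 = (F ++ [a]).length by simp,
          show ((((F ++ S).length : Nat) : Int) + 1)
              = (((F ++ [a]).length : Nat) : Int) + ((S.length : Nat) : Int) by push_cast [List.length_append, List.length_singleton]; ring,
          ih (F ++ [a]) S]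
      simp [h, List.append_assoc]
    · have h' : p a = false := by simpa using h
      simp only [pvIdxsOf, h', Bool.false_eq_true, if_false]
      rw [show ((F.length : Int) + (S.length : Int) + 1)
            = ((F.length : Nat) : Int) + (((S ++ [a]).length : Nat) : Int) by push_cast [List.length_append, List.length_singleton]; ring,
          show F ++ (S ++ a :: T) = F ++ ((S ++ [a]) ++ T) by simp,
          ih F (S ++ [a])]
      simp [h', List.append_assoc]

-- A's mystr comprehension is a map over the list
lemma pvMystr_eq (g : String → Int) (array : List String) :
    (PySem.List.pyRange 0 (array.length : Int) 1).map (fun index => g (PySem.List.pyGetD array index "")) =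
      array.map g := by
  rw [show (fun index => g (PySem.List.pyGetD array index "")) =
      g ∘ (fun index : Int => PySem.List.pyGetD array index "") from rfl]
  rw [← List.map_map]
  rw [PySem.List.map_pyGetD_pyRange_zero']

-- ===== VERDICT (by name: the statement is the Claim_ definition above) =====
theorem check_if_lexicalized_spec : Claim_equal_check_if_lexicalized := by
  intro form array hdom hpre
  unfold Spec_check_if_lexicalized
  unfold check_if_lexicalized check_if_lexicalized_alt
  rw [pvLoopA_eq]
  rw [show (fun a => PySem.List.pyGetD ((PySem.Str.split? a "+").getD []) 0 "" == form) = pvBase form from rfl]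
  rw [show (fun a => PySem.Str.len (PySem.Str.slice a (some 0) (some (PySem.Str.find a "+")))) = pvPrefLen from rfl]
  rw [show (fun index => PySem.Str.len (PySem.Str.slice (PySem.List.pyGetD array index "")
        (some 0) (some (PySem.Str.find (PySem.List.pyGetD array index "") "+")))) =
      (fun index => pvPrefLen (PySem.List.pyGetD array index "")) from rfl]
  simp only [List.drop_zero]
  rw [pvMystr_eq pvPrefLen array]
  cases hfind : List.findIdx? (pvBase form) array with
  | some j =>
    have hj : j < array.length := (List.findIdx?_eq_some_iff_findIdx_eq.mp hfind).1
    simp only [Option.map_some]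
    rw [PySem.List.pop?_natCast array j hj]
    dsimp only
    rw [PySem.List.insert_zero]
    simp only [Nat.zero_add]
    rw [List.getD_eq_getElem array "" hj]
  | none =>
    simp only [Option.map_none]
    cases hmax : PySem.List.max? (array.map pvPrefLen) (fun x => x) with
    | none =>
      exact absurd (List.map_eq_nil_iff.mp ((PySem.List.max?_eq_none_iff _ _).mp hmax)) hpre
    | some m =>
      dsimp only
      split_ifs with hm
      · rw [pvIndmax_eq pvPrefLen m array 0]
        rw [pvZipFilter_eq pvPrefLen (fun x => x == m) array,
            pvZipFilter_eq pvPrefLen (fun x => x != m) array]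
        have := pvMoveA_part (fun a => pvPrefLen a == m) array [] []
        simp only [List.nil_append, List.length_nil, Nat.cast_zero, add_zero] at this
        rw [this]
        simp [bne]
      · rfl
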